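-- pv_equiv track=rewrite | github.com/qlehman/Edge-Priority-Node-Elimination | Edge Priority Node Elimination.py | nodePriority
-- ===== SOURCE A (Python) =====
-- def nodePriority(nodesEdges, high):
--     nodes = nodesEdges[0]
--     edges = nodesEdges[1]
--     flipper = -1
--     if high:
--         flipper = 1
--
--     retOrder = []
--     while nodes:
--         nodeEdgeCount = {}
--         for node in nodes:
--             nodeEdgeCount[node] = 0
--         for edge in edges:
--             for node in edge:
--                 if node in nodeEdgeCount:
--                     nodeEdgeCount[node] += 1
--
--         maxEdge = (sorted(nodeEdgeCount.items(), key=lambda item: (flipper*item[1], item[0]), reverse=high))[0][0]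
--         nodes.remove(maxEdge)
--         edges = [edge for edge in edges if not maxEdge in edge]
--         retOrder.append(maxEdge)
--     return retOrder
-- ===== SOURCE B (Python) =====
-- def nodePriority(nodesEdges, high):
--     # B: incremental degrees with a prebuilt incidence index -- degrees are
--     # counted ONCE; removing a node kills its incident edges via the index
--     # (lazy dead-set) and decrements the survivors' degrees.  No per-round
--     # recount, no per-round edge-list rebuild, no sort.
--     # (A mutates nodesEdges[0] in place via .remove; B leaves its input intact.)
--     nodes0, edges0 = nodesEdges[0], nodesEdges[1]
--     mult = {}
--     for n in nodes0:
--         mult[n] = mult.get(n, 0) + 1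
--     deg = {}
--     for n in nodes0:
--         deg[n] = 0
--     inc = {}
--     for i, e in enumerate(edges0):
--         for x in e:
--             if x in deg:
--                 deg[x] += 1
--                 inc.setdefault(x, []).append((i, e))
--     dead = set()
--     order = []
--     for _ in range(len(nodes0)):
--         if high:
--             best = max(deg, key=lambda n: (deg[n], n))
--         else:
--             best = min(deg, key=lambda n: (-deg[n], n))
--         order.append(best)
--         for i, e in inc.get(best, []):
--             if i not in dead:
--                 dead.add(i)
--                 for x in e:
--                     if x in deg:
--                         deg[x] -= 1
--         mult[best] -= 1
--         if mult[best] == 0: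
--             del deg[best]
--     return order
-- ===== Notes on version B (the rewrite author's own statement) =====
-- stated objective: faster
-- what changed: A recounts every node's degree from scratch each round (rebuilding a dict and sorting all items) and rebuilds the whole edge list per round; B counts degrees once, builds a node-to-incident-edges index once, and on each removal lazily kills the incident edges via a dead-set and decrements only the affected degrees, picking the unique extremal node by a single linear scan; B also does not mutate the input node list.
import Mathlib
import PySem

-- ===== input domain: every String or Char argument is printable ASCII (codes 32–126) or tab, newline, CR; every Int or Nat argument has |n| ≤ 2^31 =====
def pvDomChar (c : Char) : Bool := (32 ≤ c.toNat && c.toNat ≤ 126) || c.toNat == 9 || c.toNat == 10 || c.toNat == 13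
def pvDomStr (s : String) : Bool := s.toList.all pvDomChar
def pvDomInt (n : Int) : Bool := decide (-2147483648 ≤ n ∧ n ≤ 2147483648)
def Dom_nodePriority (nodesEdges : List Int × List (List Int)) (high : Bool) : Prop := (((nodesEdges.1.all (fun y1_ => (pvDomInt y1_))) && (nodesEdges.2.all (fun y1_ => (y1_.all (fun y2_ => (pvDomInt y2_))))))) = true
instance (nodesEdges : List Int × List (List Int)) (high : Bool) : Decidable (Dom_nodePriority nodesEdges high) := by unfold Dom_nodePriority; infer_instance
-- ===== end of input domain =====

-- B replaces A's per-round degree recount + full sort + edge-list rebuild by a one-time degree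
-- count and node→incident-edge index with a lazy dead-set: removing a node kills its incident
-- edges via the index and decrements only the affected degrees; the unique extremal node is
-- found by a single linear scan.  Equivalence is about the RETURN value only (A mutates
-- nodesEdges[0] in place via .remove, B does not).

-- ===== PORT A =====

-- termination helper for both A-side loops: a successful list.remove shortens the list by one
theorem pvRemoveLen {xs ys : List Int} {v : Int} (h : PySem.List.remove? xs v = some ys) :
    ys.length + 1 = xs.length := by
  have hv : v ∈ xs := by
    by_contra hv
    rw [(PySem.List.remove?_eq_none_iff xs v).mpr hv] at h
    simp at h
  rw [PySem.List.remove?_eq_some_erase xs v hv] at h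
  cases h
  have := List.length_pos_of_mem hv
  simp [List.length_erase_of_mem hv]
  omega

-- 'if node in nodeEdgeCount: nodeEdgeCount[node] += 1'
def pvAStep (d : PySem.Dict Int Int) (x : Int) : PySem.Dict Int Int :=
  if d.contains x then d.insert x (d.getD x 0 + 1) else d

-- the per-round dict build: zeros for every node, then count edge occurrences
def pvACount (nodes : List Int) (edges : List (List Int)) : PySem.Dict Int Int :=
  edges.foldl (fun d e => e.foldl pvAStep d)
    (nodes.foldl (fun d n => d.insert n 0) PySem.Dict.empty)

-- the 'while nodes:' loop of A
def pvALoop (nodes : List Int) (edges : List (List Int)) (flipper : Int) (high : Bool)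
    (retOrder : List Int) : List Int :=
  match nodes with
  | [] => retOrder
  | n0 :: rest =>
    let d := pvACount (n0 :: rest) edges
    -- sorted(items, key=lambda item: (flipper*item[1], item[0]), reverse=high)[0][0]
    -- (headD default unreachable: the dict is nonempty since nodes is)
    let m := ((PySem.List.sorted2 d.items (fun it => flipper * it.2) (fun it => it.1) high).headD (0, 0)).1
    match h : PySem.List.remove? (n0 :: rest) m with
    | some nodes' =>
        pvALoop nodes' (edges.filter (fun e => !(e.contains m))) flipper high (retOrder ++ [m])
    | none => retOrder   -- unreachable: m is a key of the dict built from nodes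
termination_by nodes.length
decreasing_by
  have := pvRemoveLen h
  simp at this ⊢
  omega

def nodePriority (nodesEdges : List Int × List (List Int)) (high : Bool) : List Int :=
  let nodes := nodesEdges.1
  let edges := nodesEdges.2
  let flipper : Int := if high then 1 else -1
  pvALoop nodes edges flipper high []

-- ===== PORT B =====

-- 'for x in e: if x in deg: deg[x] -= 1'
def pvBDec (d : PySem.Dict Int Int) (x : Int) : PySem.Dict Int Int :=
  if d.contains x then d.insert x (d.getD x 0 - 1) else d

-- 'for i, e in inc.get(best, []): if i not in dead: dead.add(i); <decrement e's slots>'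
def pvBKill (st : PySem.Set Int × PySem.Dict Int Int) (ie : Int × List Int) :
    PySem.Set Int × PySem.Dict Int Int :=
  if PySem.Set.contains st.1 ie.1 then st
  else (PySem.Set.add st.1 ie.1, ie.2.foldl pvBDec st.2)

-- one slot of the one-time build pass:
-- 'if x in deg: deg[x] += 1; inc.setdefault(x, []).append((i, e))'
def pvBSlot (ie : Int × List Int)
    (st : PySem.Dict Int Int × PySem.Dict Int (List (Int × List Int))) (x : Int) :
    PySem.Dict Int Int × PySem.Dict Int (List (Int × List Int)) :=
  if st.1.contains x then
    (st.1.insert x (st.1.getD x 0 + 1), st.2.modify x [] (fun l => l ++ [ie]))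
  else st

-- 'for i, e in enumerate(edges0): for x in e: …'
def pvBBuild (edges0 : List (List Int)) (deg0 : PySem.Dict Int Int) :
    PySem.Dict Int Int × PySem.Dict Int (List (Int × List Int)) :=
  (PySem.List.enumerate edges0 0).foldl (fun st ie => ie.2.foldl (pvBSlot ie) st)
    (deg0, PySem.Dict.empty)

-- 'for _ in range(len(nodes0)): …'
def pvBLoop (high : Bool) (inc : PySem.Dict Int (List (Int × List Int))) (fuel : Nat)
    (deg : PySem.Dict Int Int) (mult : PySem.Dict Int Int) (dead : PySem.Set Int)
    (order : List Int) : List Int :=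
  match fuel with
  | 0 => order
  | Nat.succ fuel =>
    match (if high then PySem.List.max2? deg.keys (fun n => deg.getD n 0) (fun n => n)
           else PySem.List.min2? deg.keys (fun n => -(deg.getD n 0)) (fun n => n)) with
    | none => order    -- unreachable: deg is nonempty while iterations remain
    | some best =>
      let st := (inc.getD best []).foldl pvBKill (dead, deg)
      let mult' := mult.insert best (mult.getD best 0 - 1)
      if mult'.getD best 0 == 0 then
        pvBLoop high inc fuel (st.2.erase best) mult' st.1 (order ++ [best])
      else
        pvBLoop high inc fuel st.2 mult' st.1 (order ++ [best])

def nodePriority_alt (nodesEdges : List Int × List (List Int)) (high : Bool) : List Int :=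
  let nodes0 := nodesEdges.1
  let edges0 := nodesEdges.2
  let mult := nodes0.foldl (fun d n => d.insert n (d.getD n 0 + 1)) PySem.Dict.empty
  let deg0 := nodes0.foldl (fun d n => d.insert n 0) PySem.Dict.empty
  let di := pvBBuild edges0 deg0
  pvBLoop high di.2 nodes0.length di.1 mult PySem.Set.empty []

-- ===== PRECONDITION & SPEC =====
def Spec_nodePriority (nodesEdges : List Int × List (List Int)) (high : Bool) (out : List Int) : Prop := out = nodePriority_alt nodesEdges high
instance (nodesEdges : List Int × List (List Int)) (high : Bool) (out : List Int) : Decidable (Spec_nodePriority nodesEdges high out) := by unfold Spec_nodePriority; infer_instance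

-- ===== CLAIM (what is proved, stated in full; the proofs are below) =====
def Claim_equal_nodePriority : Prop := ∀ (nodesEdges : List Int × List (List Int)) (high : Bool), Dom_nodePriority nodesEdges high → Spec_nodePriority nodesEdges high (nodePriority nodesEdges high)

-- ===== LEMMAS AND PROOFS =====

-- the count both programs track: per-slot occurrences of v in a list of edges
def pvCntF (es : List (List Int)) (v : Int) : Int := ((es.flatMap (fun e => e)).count v : Int)

-- A's per-round count (occurrences among slots that are live nodes)
def pvCnt (nodes : List Int) (edges : List (List Int)) (v : Int) : Int :=
  ((edges.flatMap (fun e => e.filter (fun x => decide (x ∈ nodes)))).count v : Int)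

theorem pvCntF_append (xs ys : List (List Int)) (v : Int) :
    pvCntF (xs ++ ys) v = pvCntF xs v + pvCntF ys v := by
  unfold pvCntF
  rw [List.flatMap_append, List.count_append]
  push_cast
  ring

theorem pvCnt_mem {nodes : List Int} {v : Int} (h : v ∈ nodes) (es : List (List Int)) :
    pvCnt nodes es v = pvCntF es v := by
  unfold pvCnt pvCntF
  induction es with
  | nil => simp
  | cons e es ih =>
    simp only [List.flatMap_cons, List.count_append]
    rw [List.count_filter (by simpa using h)]
    push_cast at ih ⊢
    omega

theorem pvCntF_partition (es : List (List Int)) (p : List Int → Bool) (v : Int) :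
    pvCntF (es.filter p) v + pvCntF (es.filter (fun e => !(p e))) v = pvCntF es v := by
  induction es with
  | nil => simp [pvCntF]
  | cons e es ih =>
    have h1 := pvCntF_append [e] (es.filter p) v
    have h2 := pvCntF_append [e] (es.filter (fun e => !(p e))) v
    have h3 := pvCntF_append [e] es v
    by_cases hp : p e = true
    · rw [List.filter_cons_of_pos hp, List.filter_cons_of_neg (by simp [hp])]
      simp only [List.singleton_append] at h1 h3
      rw [h1, h3]
      omega
    · rw [List.filter_cons_of_neg (by simpa using hp), List.filter_cons_of_pos (by simp [hp])]
      simp only [List.singleton_append] at h2 h3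
      rw [h2, h3]
      omega


-- ---- generic selection machinery (head of insertion sort / running extremum) ----

theorem pvInsertByHead {α : Type} (before : α → α → Bool)
    (hirr : ∀ a, before a a = false)
    (htr : ∀ a b c, before a b = true → before b c = true → before a c = true) :
    ∀ (xs acc : List α),
      (∀ h t, acc = h :: t → ∀ y ∈ acc, before y h = false) →
      ∀ {h' t'}, xs.foldl (fun a x => PySem.List.insertBy before x a) acc = h' :: t' →
        (∀ y ∈ h' :: t', before y h' = false) ∧ (∀ y, y ∈ h' :: t' ↔ y ∈ acc ∨ y ∈ xs) := by
  intro xs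
  induction xs with
  | nil =>
    intro acc hacc h' t' hfold
    simp at hfold
    subst hfold
    refine ⟨hacc h' t' rfl, by simp⟩
  | cons x xs ih =>
    intro acc hacc h' t' hfold
    simp only [List.foldl_cons] at hfold
    have hacc' : ∀ h t, PySem.List.insertBy before x acc = h :: t →
        ∀ y ∈ PySem.List.insertBy before x acc, before y h = false := by
      cases acc with
      | nil =>
        intro h t heq y hy
        simp [PySem.List.insertBy] at heq hy
        obtain ⟨rfl, rfl⟩ := heq
        subst hy
        exact hirr y
      | cons a t0 =>
        intro h t heq y hy
        simp only [PySem.List.insertBy] at heq hy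
        by_cases hba : before x a = true
        · rw [if_pos hba] at heq hy
          injection heq with h1 h2
          subst h1
          simp only [List.mem_cons] at hy
          rcases hy with rfl | rfl | hy
          · exact hirr y
          · by_contra hyx
            simp at hyx
            have := htr y x y hyx hba
            rw [hirr y] at this
            exact Bool.noConfusion this
          · by_contra hyx
            simp at hyx
            have := htr y x a hyx hba
            rw [hacc a t0 rfl y (by simp [hy])] at this
            exact Bool.noConfusion this
        · rw [if_neg hba] at heq hy
          injection heq with h1 h2
          subst h1
          simp only [List.mem_cons] at hy
          rcases hy with rfl | hy
          · exact hirr y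
          · rw [PySem.List.mem_insertBy] at hy
            rcases hy with rfl | hy
            · simpa using hba
            · exact hacc a t0 rfl y (by simp [hy])
    obtain ⟨hmin, hmem⟩ := ih (PySem.List.insertBy before x acc) hacc' hfold
    refine ⟨hmin, ?_⟩
    intro y
    rw [hmem y, PySem.List.mem_insertBy]
    simp
    tauto

theorem pvRunningSel {α : Type} (cond : α → α → Bool)
    (hirr : ∀ a, cond a a = false)
    (htr : ∀ a b c, cond a b = true → cond b c = true → cond a c = true)
    (hneg : ∀ a b c, cond a b = false → cond b c = false → cond a c = false) :
    ∀ (xs : List α) (m0 : α),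
      ∃ m', xs.foldl (fun acc x => match acc with
              | none => some x
              | some m => if cond m x then some x else some m) (some m0) = some m' ∧
            m' ∈ m0 :: xs ∧ (∀ y ∈ m0 :: xs, cond m' y = false) := by
  intro xs
  induction xs with
  | nil =>
    intro m0
    refine ⟨m0, by simp, by simp, ?_⟩
    intro y hy
    simp at hy
    subst hy
    exact hirr y
  | cons x xs ih =>
    intro m0
    simp only [List.foldl_cons]
    by_cases hc : cond m0 x = true
    · obtain ⟨m', h1, h2, h3⟩ := ih x
      refine ⟨m', by simp [hc]; exact h1, by simp at h2 ⊢; tauto, ?_⟩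
      intro y hy
      simp at hy
      rcases hy with rfl | rfl | hy
      · by_contra hm
        simp at hm
        have := htr m' y x hm hc
        rw [h3 x (by simp)] at this
        exact Bool.noConfusion this
      · exact h3 y (by simp)
      · exact h3 y (by simp [hy])
    · simp at hc
      obtain ⟨m', h1, h2, h3⟩ := ih m0
      refine ⟨m', by simp [hc]; exact h1, by simp at h2 ⊢; tauto, ?_⟩
      intro y hy
      simp at hy
      rcases hy with rfl | rfl | hy
      · exact h3 y (by simp)
      · exact hneg m' m0 y (h3 m0 (by simp)) hc
      · exact h3 y (by simp [hy])

-- ---- A's per-round dict: keys and values ----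

theorem pvStep_contains (d : PySem.Dict Int Int) (x k : Int) :
    (pvAStep d x).contains k = d.contains k := by
  unfold pvAStep
  split
  · rename_i hc
    rw [PySem.Dict.contains_insert]
    by_cases hk : k = x
    · subst hk; simp [hc]
    · simp [hk]
  · rfl

theorem pvStep_keys (d : PySem.Dict Int Int) (x : Int) : (pvAStep d x).keys = d.keys := by
  unfold pvAStep
  split
  · rename_i hc
    exact PySem.Dict.keys_insert_of_contains _ _ hc
  · rfl

theorem pvFoldEdge_contains (l : List Int) (d : PySem.Dict Int Int) (k : Int) :
    (l.foldl pvAStep d).contains k = d.contains k := by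
  induction l generalizing d with
  | nil => rfl
  | cons x xs ih => simp only [List.foldl_cons]; rw [ih, pvStep_contains]

theorem pvFoldEdge_keys (l : List Int) (d : PySem.Dict Int Int) :
    (l.foldl pvAStep d).keys = d.keys := by
  induction l generalizing d with
  | nil => rfl
  | cons x xs ih => simp only [List.foldl_cons]; rw [ih, pvStep_keys]

theorem pvFoldEdge_getD (l : List Int) (d : PySem.Dict Int Int) (v : Int) :
    (l.foldl pvAStep d).getD v 0 =
      d.getD v 0 + (((l.filter (fun x => d.contains x)).count v : Int)) := by
  induction l generalizing d with
  | nil => simp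
  | cons x xs ih =>
    simp only [List.foldl_cons]
    rw [ih]
    have hpred : List.filter (fun y => (pvAStep d x).contains y) xs = List.filter (fun y => d.contains y) xs :=
      List.filter_congr (fun y _ => pvStep_contains d x y)
    rw [hpred]
    by_cases hc : d.contains x = true
    · unfold pvAStep
      rw [if_pos hc]
      by_cases hv : v = x
      · subst hv
        rw [PySem.Dict.getD_insert_self]
        simp [hc]
        ring
      · rw [PySem.Dict.getD_insert_of_ne]
        · simp [hc, List.count_cons]
          intro h
          exact absurd h.symm hv
        · exact fun h => hv h
    · unfold pvAStep
      rw [if_neg hc]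
      simp at hc
      simp [hc]

theorem pvFoldEdges_getD (es : List (List Int)) (d : PySem.Dict Int Int) (v : Int) :
    ((es.foldl (fun d e => e.foldl pvAStep d) d).getD v 0) =
      d.getD v 0 + ((es.flatMap (fun e => e.filter (fun x => d.contains x))).count v : Int) := by
  induction es generalizing d with
  | nil => simp
  | cons e es ih =>
    simp only [List.foldl_cons]
    rw [ih]
    have hflat : es.flatMap (fun e' => e'.filter (fun x => (e.foldl pvAStep d).contains x)) =
        es.flatMap (fun e' => e'.filter (fun x => d.contains x)) := by
      apply List.flatMap_congr
      intro e' _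
      exact List.filter_congr (fun y _ => pvFoldEdge_contains e d y)
    rw [hflat, pvFoldEdge_getD]
    simp [List.count_append]
    ring

theorem pvInit_getD (l : List Int) (d : PySem.Dict Int Int) (h : ∀ k, d.getD k 0 = 0) (k : Int) :
    ((l.foldl (fun d n => d.insert n 0) d).getD k 0) = 0 := by
  induction l generalizing d with
  | nil => exact h k
  | cons x xs ih =>
    simp only [List.foldl_cons]
    refine ih _ (fun j => ?_)
    rw [PySem.Dict.getD_insert]
    split <;> simp [h]

theorem pvFoldEdges_keys (es : List (List Int)) (d : PySem.Dict Int Int) :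
    (es.foldl (fun d e => e.foldl pvAStep d) d).keys = d.keys := by
  induction es generalizing d with
  | nil => rfl
  | cons e es ih => simp only [List.foldl_cons]; rw [ih, pvFoldEdge_keys]

theorem pvInit_keys (nodes : List Int) :
    ((nodes.foldl (fun d n => d.insert n 0) (PySem.Dict.empty : PySem.Dict Int Int)).keys) =
      PySem.Set.ofList nodes := by
  have h := PySem.Dict.keys_foldl_insert nodes (fun _ _ => (0 : Int)) PySem.Dict.empty
  rw [PySem.Dict.keys_empty, PySem.Set.update_nil_left] at h
  exact h

theorem pvInit_contains (nodes : List Int) (x : Int) :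
    ((nodes.foldl (fun d n => d.insert n 0) (PySem.Dict.empty : PySem.Dict Int Int)).contains x) =
      decide (x ∈ nodes) := by
  by_cases hx : x ∈ nodes
  · simp [hx]
    rw [PySem.Dict.contains_iff_mem_keys, pvInit_keys, PySem.Set.mem_ofList]
    exact hx
  · simp [hx]
    rw [← Bool.not_eq_true]
    intro hcon
    rw [PySem.Dict.contains_iff_mem_keys, pvInit_keys, PySem.Set.mem_ofList] at hcon
    exact hx hcon

theorem pvACount_getD (nodes : List Int) (edges : List (List Int)) (v : Int) :
    (pvACount nodes edges).getD v 0 = pvCnt nodes edges v := by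
  unfold pvACount pvCnt
  rw [pvFoldEdges_getD]
  rw [pvInit_getD nodes PySem.Dict.empty (fun k => PySem.Dict.getD_empty k 0) v]
  have : edges.flatMap (fun e => e.filter (fun x =>
      (nodes.foldl (fun d n => d.insert n 0) (PySem.Dict.empty : PySem.Dict Int Int)).contains x)) =
      edges.flatMap (fun e => e.filter (fun x => decide (x ∈ nodes))) := by
    apply List.flatMap_congr
    intro e _
    exact List.filter_congr (fun y _ => pvInit_contains nodes y)
  rw [this]
  ring

theorem pvACount_items (nodes : List Int) (edges : List (List Int)) :
    (pvACount nodes edges).items =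
      (PySem.Set.ofList nodes).map (fun k => (k, pvCnt nodes edges k)) := by
  have hkeys : (pvACount nodes edges).keys = PySem.Set.ofList nodes := by
    unfold pvACount
    rw [pvFoldEdges_keys, pvInit_keys]
  have hnodup : (pvACount nodes edges).keys.Nodup := by
    unfold pvACount
    rw [pvFoldEdges_keys]
    exact PySem.Dict.nodup_keys_foldl_insert nodes _ _ PySem.Dict.nodup_keys_empty
  rw [PySem.Dict.items_eq_map_keys _ hnodup 0, hkeys]
  exact List.map_congr_left (fun k _ => by rw [pvACount_getD])

-- ---- the two selections pick the same (unique) extremal node ----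

theorem pvSelB (n0 : Int) (rest : List Int) (edgesA : List (List Int)) (high : Bool)
    (deg : PySem.Dict Int Int)
    (hcont : ∀ v, deg.contains v = decide (v ∈ n0 :: rest))
    (hval : ∀ v ∈ n0 :: rest, deg.getD v 0 = pvCnt (n0 :: rest) edgesA v) :
    (((PySem.List.sorted2 (pvACount (n0 :: rest) edgesA).items
        (fun it => (if high then (1 : Int) else -1) * it.2) (fun it => it.1) high).headD (0, 0)).1 ∈ (n0 :: rest)) ∧
    ((if high then PySem.List.max2? deg.keys (fun n => deg.getD n 0) (fun n => n)
      else PySem.List.min2? deg.keys (fun n => -(deg.getD n 0)) (fun n => n)) =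
      some (((PySem.List.sorted2 (pvACount (n0 :: rest) edgesA).items
        (fun it => (if high then (1 : Int) else -1) * it.2) (fun it => it.1) high).headD (0, 0)).1)) := by
  have hkeysmem : ∀ v : Int, v ∈ deg.keys ↔ v ∈ n0 :: rest := by
    intro v
    rw [← PySem.Dict.contains_iff_mem_keys, hcont]
    simp
  obtain ⟨k0, krest, hkeq⟩ : ∃ k0 krest, deg.keys = k0 :: krest := by
    cases hk : deg.keys with
    | nil =>
      exfalso
      have := (hkeysmem n0).mpr (by simp)
      rw [hk] at this
      simp at this
    | cons a b => exact ⟨a, b, rfl⟩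
  have hitems := pvACount_items (n0 :: rest) edgesA
  have hitems_ne : (pvACount (n0 :: rest) edgesA).items ≠ [] := by
    rw [hitems]
    have : n0 ∈ PySem.Set.ofList (n0 :: rest) := (PySem.Set.mem_ofList _ _).mpr (by simp)
    intro hcon
    rw [List.map_eq_nil_iff] at hcon
    rw [hcon] at this
    simp at this
  cases high with
  | false =>
    simp only [Bool.false_eq_true, if_false]
    rcases hs : PySem.List.sorted2 (pvACount (n0 :: rest) edgesA).items
        (fun it => (-1 : Int) * it.2) (fun it => it.1) false with _ | ⟨m, t⟩
    · exact absurd (List.Perm.eq_nil ((hs ▸ PySem.List.sorted2_perm _ _ _ _).symm)) hitems_ne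
    have hfold : (pvACount (n0 :: rest) edgesA).items.foldl
        (fun a x => PySem.List.insertBy
          (fun a b => decide ((-1 : Int) * a.2 < (-1 : Int) * b.2) ||
            (!decide ((-1 : Int) * b.2 < (-1 : Int) * a.2) && decide (a.1 < b.1))) x a) [] = m :: t := by
      simpa [PySem.List.sorted2] using hs
    obtain ⟨hmin, hmem⟩ := pvInsertByHead _
      (by intro a; simp)
      (by intro a b c hab hbc; simp at hab hbc ⊢; omega)
      _ [] (by intro h t heq y hy; simp at heq) hfold
    have hmitems : m ∈ (pvACount (n0 :: rest) edgesA).items := by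
      have := (hmem m).mp (by simp)
      simpa using this
    rw [hitems] at hmitems
    obtain ⟨km, hkmS, hkm⟩ := List.mem_map.mp hmitems
    have hkmem : km ∈ n0 :: rest := (PySem.Set.mem_ofList _ _).mp hkmS
    obtain ⟨mB, h1, h2, h3⟩ := pvRunningSel
      (fun m x : Int => decide (-(deg.getD x 0) < -(deg.getD m 0)) ||
        (!decide (-(deg.getD m 0) < -(deg.getD x 0)) && decide (x < m)))
      (by intro a; simp)
      (by intro a b c hab hbc; simp at hab hbc ⊢; omega)
      (by intro a b c hab hbc; simp at hab hbc ⊢; omega)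
      krest k0
    have hmBnodes : mB ∈ n0 :: rest := (hkeysmem mB).mp (by rw [hkeq]; exact h2)
    have hminB : PySem.List.min2? deg.keys (fun n => -(deg.getD n 0)) (fun n => n) = some mB := by
      unfold PySem.List.min2?
      rw [hkeq]
      simp only [List.foldl_cons]
      exact h1
    have hA := hmin ((mB, pvCnt (n0 :: rest) edgesA mB)) ((hmem _).mpr (Or.inr (by
      rw [hitems]
      exact List.mem_map.mpr ⟨mB, (PySem.Set.mem_ofList _ _).mpr hmBnodes, rfl⟩)))
    have hB := h3 km (by rw [← hkeq]; exact (hkeysmem km).mpr hkmem)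
    rw [hval mB hmBnodes, hval km hkmem] at hB
    simp only [List.headD_cons]
    subst hkm
    simp only at hA hB ⊢
    constructor
    · exact hkmem
    · rw [hminB]
      congr 1
      simp at hA hB
      omega
  | true =>
    simp only [if_true]
    rcases hs : PySem.List.sorted2 (pvACount (n0 :: rest) edgesA).items
        (fun it => (1 : Int) * it.2) (fun it => it.1) true with _ | ⟨m, t⟩
    · exact absurd (List.Perm.eq_nil ((hs ▸ PySem.List.sorted2_perm _ _ _ _).symm)) hitems_ne
    have hfold : (pvACount (n0 :: rest) edgesA).items.foldl
        (fun a x => PySem.List.insertBy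
          (fun a b => decide ((1 : Int) * b.2 < (1 : Int) * a.2) ||
            (!decide ((1 : Int) * a.2 < (1 : Int) * b.2) && decide (b.1 < a.1))) x a) [] = m :: t := by
      simpa [PySem.List.sorted2] using hs
    obtain ⟨hmin, hmem⟩ := pvInsertByHead _
      (by intro a; simp)
      (by intro a b c hab hbc; simp at hab hbc ⊢; omega)
      _ [] (by intro h t heq y hy; simp at heq) hfold
    have hmitems : m ∈ (pvACount (n0 :: rest) edgesA).items := by
      have := (hmem m).mp (by simp)
      simpa using this
    rw [hitems] at hmitems
    obtain ⟨km, hkmS, hkm⟩ := List.mem_map.mp hmitems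
    have hkmem : km ∈ n0 :: rest := (PySem.Set.mem_ofList _ _).mp hkmS
    obtain ⟨mB, h1, h2, h3⟩ := pvRunningSel
      (fun m x : Int => decide (deg.getD m 0 < deg.getD x 0) ||
        (!decide (deg.getD x 0 < deg.getD m 0) && decide (m < x)))
      (by intro a; simp)
      (by intro a b c hab hbc; simp at hab hbc ⊢; omega)
      (by intro a b c hab hbc; simp at hab hbc ⊢; omega)
      krest k0
    have hmBnodes : mB ∈ n0 :: rest := (hkeysmem mB).mp (by rw [hkeq]; exact h2)
    have hminB : PySem.List.max2? deg.keys (fun n => deg.getD n 0) (fun n => n) = some mB := by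
      unfold PySem.List.max2?
      rw [hkeq]
      simp only [List.foldl_cons]
      exact h1
    have hA := hmin ((mB, pvCnt (n0 :: rest) edgesA mB)) ((hmem _).mpr (Or.inr (by
      rw [hitems]
      exact List.mem_map.mpr ⟨mB, (PySem.Set.mem_ofList _ _).mpr hmBnodes, rfl⟩)))
    have hB := h3 km (by rw [← hkeq]; exact (hkeysmem km).mpr hkmem)
    rw [hval mB hmBnodes, hval km hkmem] at hB
    simp only [List.headD_cons]
    subst hkm
    simp only at hA hB ⊢
    constructor
    · exact hkmem
    · rw [hminB]
      congr 1
      simp at hA hB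
      omega


-- ---- Dict.erase facts ----

theorem pvEraseFind? {v : Type} (l : List (Int × v)) (k j : Int) (h : j ≠ k) :
    (l.filter (fun p => !(p.1 == k))).find? (fun p => p.1 == j) = l.find? (fun p => p.1 == j) := by
  induction l with
  | nil => rfl
  | cons p l ih =>
    by_cases hk : p.1 = k
    · rw [List.filter_cons_of_neg (by simp [hk]), ih,
        List.find?_cons_of_neg (by simp [hk, h.symm])]
    · rw [List.filter_cons_of_pos (by simp [hk])]
      by_cases hj : p.1 = j
      · rw [List.find?_cons_of_pos (by simp [hj]), List.find?_cons_of_pos (by simp [hj])]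
      · rw [List.find?_cons_of_neg (by simp [hj]), List.find?_cons_of_neg (by simp [hj]), ih]

theorem pvErase_getD {v : Type} (d : PySem.Dict Int v) (k j : Int) (dflt : v) (h : j ≠ k) :
    (d.erase k).getD j dflt = d.getD j dflt := by
  simp only [PySem.Dict.getD, PySem.Dict.get?, PySem.Dict.erase]
  rw [pvEraseFind? d.items k j h]

theorem pvErase_contains_self {v : Type} (d : PySem.Dict Int v) (k : Int) :
    (d.erase k).contains k = false := by
  simp only [PySem.Dict.contains, PySem.Dict.erase]
  simp [List.any_filter]

theorem pvErase_contains_of_ne {v : Type} (d : PySem.Dict Int v) (k j : Int) (h : j ≠ k) :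
    (d.erase k).contains j = d.contains j := by
  rw [Bool.eq_iff_iff]
  simp only [PySem.Dict.contains, PySem.Dict.erase, List.any_eq_true, List.mem_filter,
    Bool.not_eq_true', beq_eq_false_iff_ne, beq_iff_eq]
  constructor
  · rintro ⟨p, ⟨hp, _⟩, hpj⟩
    exact ⟨p, hp, hpj⟩
  · rintro ⟨p, hp, hpj⟩
    exact ⟨p, ⟨hp, by rw [hpj]; exact h⟩, hpj⟩

-- ---- the decrement loop of B's kill step ----

theorem pvBDec_contains (d : PySem.Dict Int Int) (x k : Int) :
    (pvBDec d x).contains k = d.contains k := by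
  unfold pvBDec
  split
  · rename_i hc
    rw [PySem.Dict.contains_insert]
    by_cases hk : k = x
    · subst hk; simp [hc]
    · simp [hk]
  · rfl

theorem pvBDecFold_contains (l : List Int) (d : PySem.Dict Int Int) (k : Int) :
    (l.foldl pvBDec d).contains k = d.contains k := by
  induction l generalizing d with
  | nil => rfl
  | cons x xs ih => simp only [List.foldl_cons]; rw [ih, pvBDec_contains]

theorem pvBDecFold_getD (l : List Int) (d : PySem.Dict Int Int) (v : Int) :
    (l.foldl pvBDec d).getD v 0 =
      d.getD v 0 - (((l.filter (fun x => d.contains x)).count v : Int)) := by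
  induction l generalizing d with
  | nil => simp
  | cons x xs ih =>
    simp only [List.foldl_cons]
    rw [ih]
    have hpred : List.filter (fun y => (pvBDec d x).contains y) xs = List.filter (fun y => d.contains y) xs :=
      List.filter_congr (fun y _ => pvBDec_contains d x y)
    rw [hpred]
    by_cases hc : d.contains x = true
    · unfold pvBDec
      rw [if_pos hc]
      by_cases hv : v = x
      · subst hv
        rw [PySem.Dict.getD_insert_self]
        simp [hc]
        ring
      · rw [PySem.Dict.getD_insert_of_ne]
        · simp [hc, List.count_cons]
          intro h
          exact absurd h.symm hv
        · exact fun h => hv h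
    · unfold pvBDec
      rw [if_neg hc]
      simp at hc
      simp [hc]

-- ---- dead-set bookkeeping: which edges a removal kills ----

def pvHits (J : List (Int × List Int)) (i : Int) : Bool := J.any (fun p => decide (p.1 = i))

def pvSurv (edges0 : List (List Int)) (dead : PySem.Set Int) : List (List Int) :=
  (PySem.List.enumerate edges0 0).filterMap
    (fun ie => if PySem.Set.contains dead ie.1 then none else some ie.2)

def pvKilled (edges0 : List (List Int)) (dead : PySem.Set Int) (J : List (Int × List Int)) :
    List (List Int) :=
  (PySem.List.enumerate edges0 0).filterMap
    (fun ie => if !(PySem.Set.contains dead ie.1) && pvHits J ie.1 then some ie.2 else none)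

theorem pvEnumFun {xs : List (List Int)} {i : Int} {e1 e2 : List Int}
    (h1 : (i, e1) ∈ PySem.List.enumerate xs 0) (h2 : (i, e2) ∈ PySem.List.enumerate xs 0) :
    e1 = e2 := by
  rw [PySem.List.mem_enumerate_iff] at h1 h2
  obtain ⟨k1, hk1, he1⟩ := h1
  obtain ⟨k2, hk2, he2⟩ := h2
  have hi1 : i = (k1 : Int) := by
    have := congrArg Prod.fst he1
    simpa using this
  have hi2 : i = (k2 : Int) := by
    have := congrArg Prod.fst he2
    simpa using this
  have hk : k1 = k2 := by omega
  have hv1 : e1 = xs[k1] := by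
    have := congrArg Prod.snd he1
    simpa using this
  have hv2 : e2 = xs[k2] := by
    have := congrArg Prod.snd he2
    simpa using this
  subst hk
  rw [hv1, hv2]

theorem pvKillFold (edges0 : List (List Int)) :
    ∀ (J : List (Int × List Int)) (dead : PySem.Set Int) (deg : PySem.Dict Int Int),
    (∀ ie ∈ J, ie ∈ PySem.List.enumerate edges0 0) →
    (∀ i, PySem.Set.contains (J.foldl pvBKill (dead, deg)).1 i =
      (PySem.Set.contains dead i || pvHits J i)) ∧
    (∀ v, (J.foldl pvBKill (dead, deg)).2.contains v = deg.contains v) ∧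
    (∀ v, deg.contains v = true →
      (J.foldl pvBKill (dead, deg)).2.getD v 0 = deg.getD v 0 - pvCntF (pvKilled edges0 dead J) v) := by
  intro J
  induction J with
  | nil =>
    intro dead deg _
    refine ⟨?_, by simp, ?_⟩
    · intro i
      simp [pvHits]
    · intro v _
      have : pvKilled edges0 dead [] = [] := by
        unfold pvKilled
        apply List.filterMap_eq_nil_iff.mpr
        intro ie _
        simp [pvHits]
      rw [this]
      simp [pvCntF]
  | cons ie J ih =>
    intro dead deg hJ
    have hie : ie ∈ PySem.List.enumerate edges0 0 := hJ ie (by simp)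
    have hJ' : ∀ p ∈ J, p ∈ PySem.List.enumerate edges0 0 := fun p hp => hJ p (by simp [hp])
    simp only [List.foldl_cons]
    by_cases hdead : PySem.Set.contains dead ie.1 = true
    · rw [show pvBKill (dead, deg) ie = (dead, deg) from by
        unfold pvBKill
        rw [if_pos (show PySem.Set.contains (dead, deg).1 ie.1 = true from hdead)]]
      obtain ⟨k1, k2, k3⟩ := ih dead deg hJ'
      refine ⟨?_, k2, ?_⟩
      · intro i
        rw [k1 i]
        rw [Bool.eq_iff_iff]
        have hdm : ie.1 ∈ dead := (PySem.Set.contains_iff _ _).mp hdead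
        simp only [Bool.or_eq_true, pvHits, List.any_eq_true, decide_eq_true_eq,
          PySem.Set.contains_iff, List.mem_cons]
        constructor
        · rintro (h | ⟨p, hp, hpi⟩)
          · exact Or.inl h
          · exact Or.inr ⟨p, Or.inr hp, hpi⟩
        · rintro (h | ⟨p, hp, hpi⟩)
          · exact Or.inl h
          · rcases hp with rfl | hp
            · exact Or.inl (hpi ▸ hdm)
            · exact Or.inr ⟨p, hp, hpi⟩
      · intro v hv
        rw [k3 v hv]
        have : pvKilled edges0 dead (ie :: J) = pvKilled edges0 dead J := by
          unfold pvKilled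
          apply List.filterMap_congr
          intro je _
          by_cases hi : je.1 = ie.1
          · rw [hi, hdead]
            simp
          · have : pvHits (ie :: J) je.1 = pvHits J je.1 := by
              simp [pvHits]
              intro h
              exact absurd h.symm hi
            rw [this]
        rw [this]
    · rw [show pvBKill (dead, deg) ie = (PySem.Set.add dead ie.1, ie.2.foldl pvBDec deg) from by
        unfold pvBKill
        rw [if_neg (show ¬ PySem.Set.contains (dead, deg).1 ie.1 = true from hdead)]]
      obtain ⟨k1, k2, k3⟩ := ih (PySem.Set.add dead ie.1) (ie.2.foldl pvBDec deg) hJ'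
      have hcontadd : ∀ i : Int, PySem.Set.contains (PySem.Set.add dead ie.1) i =
          (PySem.Set.contains dead i || decide (ie.1 = i)) := by
        intro i
        rw [Bool.eq_iff_iff]
        simp only [Bool.or_eq_true, decide_eq_true_eq]
        rw [PySem.Set.contains_iff, PySem.Set.mem_add]
        rw [PySem.Set.contains_iff]
        constructor
        · rintro (h | h)
          · exact Or.inl h
          · exact Or.inr h.symm
        · rintro (h | h)
          · exact Or.inl h
          · exact Or.inr h.symm
      refine ⟨?_, ?_, ?_⟩
      · intro i
        rw [k1 i, hcontadd i]
        by_cases hi : ie.1 = i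
        · simp [pvHits, hi]
        · simp [pvHits, hi]
      · intro v
        rw [k2 v, pvBDecFold_contains]
      · intro v hv
        have hvdec : (ie.2.foldl pvBDec deg).contains v = true := by
          rw [pvBDecFold_contains]; exact hv
        rw [k3 v hvdec, pvBDecFold_getD]
        rw [List.count_filter (by simpa using hv)]
        -- decompose the enumeration around ie (indices are pairwise distinct)
        obtain ⟨l1, l2, hsplit⟩ := List.append_of_mem hie
        have hpw := PySem.List.pairwise_lt_enumerate edges0 0
        rw [hsplit] at hpw
        have hne1 : ∀ je ∈ l1, je.1 ≠ ie.1 := by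
          intro je hje
          have := (List.pairwise_append.mp hpw).2.2 je hje ie (by simp)
          omega
        have hne2 : ∀ je ∈ l2, je.1 ≠ ie.1 := by
          have := List.pairwise_append.mp hpw
          have h2 := (List.pairwise_cons.mp this.2.1).1
          intro je hje
          have := h2 je hje
          omega
        have hkey : pvCntF (pvKilled edges0 dead (ie :: J)) v
            = (ie.2.count v : Int) + pvCntF (pvKilled edges0 (PySem.Set.add dead ie.1) J) v := by
          unfold pvKilled
          rw [hsplit, List.filterMap_append, List.filterMap_append,
            List.filterMap_cons, List.filterMap_cons]
          have hndm : ie.1 ∉ dead := fun hm => hdead ((PySem.Set.contains_iff _ _).mpr hm)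
          have hc1 : (if !(PySem.Set.contains dead ie.1) && pvHits (ie :: J) ie.1
              then some ie.2 else none) = some ie.2 := by
            simp [pvHits, hndm]
          have hc2 : (if !(PySem.Set.contains (PySem.Set.add dead ie.1) ie.1) && pvHits J ie.1
              then some ie.2 else none) = none := by
            rw [hcontadd ie.1]
            simp [hdead]
          rw [hc1, hc2]
          have hagree : ∀ je : Int × List Int, je.1 ≠ ie.1 →
              (if !(PySem.Set.contains dead je.1) && pvHits (ie :: J) je.1
                then some je.2 else none)
              = (if !(PySem.Set.contains (PySem.Set.add dead ie.1) je.1) && pvHits J je.1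
                then some je.2 else none) := by
            intro je hne
            rw [hcontadd je.1]
            have : pvHits (ie :: J) je.1 = pvHits J je.1 := by
              simp [pvHits]
              intro h
              exact absurd h.symm hne
            rw [this]
            have hne' : ¬ (ie.1 = je.1) := fun hh => hne hh.symm
            simp [hne']
          rw [List.filterMap_congr (fun je hj => hagree je (hne1 je hj)),
            List.filterMap_congr (fun je hj => hagree je (hne2 je hj))]
          rw [pvCntF_append, pvCntF_append]
          have : pvCntF (ie.2 :: List.filterMap (fun je =>
              if !(PySem.Set.contains (PySem.Set.add dead ie.1) je.1) && pvHits J je.1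
              then some je.2 else none) l2) v
              = (ie.2.count v : Int) + pvCntF (List.filterMap (fun je =>
              if !(PySem.Set.contains (PySem.Set.add dead ie.1) je.1) && pvHits J je.1
              then some je.2 else none) l2) v := by
            have h := pvCntF_append [ie.2] (List.filterMap (fun je =>
              if !(PySem.Set.contains (PySem.Set.add dead ie.1) je.1) && pvHits J je.1
              then some je.2 else none) l2) v
            simp only [List.singleton_append] at h
            rw [h]
            congr 1
            simp [pvCntF]
          rw [this]
          ring
        rw [hkey]
        ring

-- after killing all edges listed for m: the survivors are exactly A's filtered edge list
theorem pvSurv_after (edges0 : List (List Int)) (dead dead' : PySem.Set Int)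
    (J : List (Int × List Int)) (m : Int)
    (hs : ∀ ie ∈ J, ie ∈ PySem.List.enumerate edges0 0 ∧ m ∈ ie.2)
    (hc : ∀ ie ∈ PySem.List.enumerate edges0 0, m ∈ ie.2 → ie ∈ J)
    (hd : ∀ i, PySem.Set.contains dead' i = (PySem.Set.contains dead i || pvHits J i)) :
    pvSurv edges0 dead' = (pvSurv edges0 dead).filter (fun e => !(e.contains m)) := by
  unfold pvSurv
  rw [List.filter_filterMap]
  apply List.filterMap_congr
  intro ie hie
  have hhits : pvHits J ie.1 = ie.2.contains m := by
    rw [Bool.eq_iff_iff]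
    simp only [pvHits, List.any_eq_true, decide_eq_true_eq, List.contains_iff_mem]
    constructor
    · rintro ⟨p, hp, hpi⟩
      obtain ⟨hpe, hpm⟩ := hs p hp
      have hp2 : (ie.1, p.2) ∈ PySem.List.enumerate edges0 0 := by
        have hpp : (p.1, p.2) ∈ PySem.List.enumerate edges0 0 := by
          rw [Prod.mk.eta]; exact hpe
        rwa [hpi] at hpp
      have hiee : (ie.1, ie.2) ∈ PySem.List.enumerate edges0 0 := by
        rw [Prod.mk.eta]; exact hie
      have : p.2 = ie.2 := pvEnumFun hp2 hiee
      rw [← this]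
      exact hpm
    · intro hm
      exact ⟨ie, hc ie hie hm, rfl⟩
  rw [hd ie.1, hhits]
  cases h1 : PySem.Set.contains dead ie.1 <;> cases h2 : ie.2.contains m <;>
    (simp [Option.filter, h2] <;> simp_all [List.contains_iff_mem])

theorem pvKilled_eq_filter (edges0 : List (List Int)) (dead : PySem.Set Int)
    (J : List (Int × List Int)) (m : Int)
    (hs : ∀ ie ∈ J, ie ∈ PySem.List.enumerate edges0 0 ∧ m ∈ ie.2)
    (hc : ∀ ie ∈ PySem.List.enumerate edges0 0, m ∈ ie.2 → ie ∈ J) :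
    pvKilled edges0 dead J = (pvSurv edges0 dead).filter (fun e => e.contains m) := by
  unfold pvKilled pvSurv
  rw [List.filter_filterMap]
  apply List.filterMap_congr
  intro ie hie
  have hhits : pvHits J ie.1 = ie.2.contains m := by
    rw [Bool.eq_iff_iff]
    simp only [pvHits, List.any_eq_true, decide_eq_true_eq, List.contains_iff_mem]
    constructor
    · rintro ⟨p, hp, hpi⟩
      obtain ⟨hpe, hpm⟩ := hs p hp
      have hp2 : (ie.1, p.2) ∈ PySem.List.enumerate edges0 0 := by
        have hpp : (p.1, p.2) ∈ PySem.List.enumerate edges0 0 := by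
          rw [Prod.mk.eta]; exact hpe
        rwa [hpi] at hpp
      have hiee : (ie.1, ie.2) ∈ PySem.List.enumerate edges0 0 := by
        rw [Prod.mk.eta]; exact hie
      have : p.2 = ie.2 := pvEnumFun hp2 hiee
      rw [← this]
      exact hpm
    · intro hm
      exact ⟨ie, hc ie hie hm, rfl⟩
  rw [hhits]
  cases h1 : PySem.Set.contains dead ie.1 <;> cases h2 : ie.2.contains m <;>
    (simp [Option.filter, h2] <;> simp_all [List.contains_iff_mem])


-- ---- the one-time build pass: degrees and the incidence index ----

theorem pvBSlot_contains_fst (ie : Int × List Int)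
    (st : PySem.Dict Int Int × PySem.Dict Int (List (Int × List Int))) (x k : Int) :
    ((pvBSlot ie st x).1).contains k = st.1.contains k := by
  unfold pvBSlot
  split
  · rename_i hc
    rw [PySem.Dict.contains_insert]
    by_cases hk : k = x
    · subst hk; simp [hc]
    · simp [hk]
  · rfl

theorem pvBSlotFold_contains (e : List Int) (ie : Int × List Int)
    (st : PySem.Dict Int Int × PySem.Dict Int (List (Int × List Int))) (k : Int) :
    ((e.foldl (pvBSlot ie) st).1).contains k = st.1.contains k := by
  induction e generalizing st with
  | nil => rfl
  | cons x xs ih => simp only [List.foldl_cons]; rw [ih, pvBSlot_contains_fst]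

theorem pvBSlotFold_getD (e : List Int) (ie : Int × List Int)
    (st : PySem.Dict Int Int × PySem.Dict Int (List (Int × List Int))) (v : Int) :
    ((e.foldl (pvBSlot ie) st).1).getD v 0 =
      st.1.getD v 0 + (((e.filter (fun x => st.1.contains x)).count v : Int)) := by
  induction e generalizing st with
  | nil => simp
  | cons x xs ih =>
    simp only [List.foldl_cons]
    rw [ih]
    have hpred : List.filter (fun y => ((pvBSlot ie st x).1).contains y) xs
        = List.filter (fun y => st.1.contains y) xs :=
      List.filter_congr (fun y _ => pvBSlot_contains_fst ie st x y)
    rw [hpred]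
    by_cases hc : st.1.contains x = true
    · unfold pvBSlot
      rw [if_pos hc]
      by_cases hv : v = x
      · subst hv
        simp only
        rw [PySem.Dict.getD_insert_self]
        simp [hc]
        ring
      · simp only
        rw [PySem.Dict.getD_insert_of_ne]
        · simp [hc, List.count_cons]
          intro h
          exact absurd h.symm hv
        · exact fun h => hv h
    · unfold pvBSlot
      rw [if_neg hc]
      simp at hc
      simp [hc]

theorem pvBSlotFold_inc (e : List Int) (ie : Int × List Int) :
    ∀ (st : PySem.Dict Int Int × PySem.Dict Int (List (Int × List Int))) (v : Int)
      (j : Int × List Int),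
      j ∈ ((e.foldl (pvBSlot ie) st).2).getD v [] ↔
        j ∈ st.2.getD v [] ∨ (j = ie ∧ v ∈ e ∧ st.1.contains v = true) := by
  induction e with
  | nil => intro st v j; simp
  | cons x xs ih =>
    intro st v j
    simp only [List.foldl_cons]
    rw [ih (pvBSlot ie st x) v j, pvBSlot_contains_fst]
    by_cases hc : st.1.contains x = true
    · have hsnd : (pvBSlot ie st x).2 = st.2.modify x [] (fun l => l ++ [ie]) := by
        unfold pvBSlot
        rw [if_pos hc]
      rw [hsnd, PySem.Dict.getD_modify]
      by_cases hv : v = x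
      · subst hv
        rw [if_pos rfl]
        simp only [List.mem_append, List.mem_singleton, List.mem_cons]
        tauto
      · rw [if_neg hv]
        simp only [List.mem_cons]
        constructor
        · rintro (h | h)
          · exact Or.inl h
          · exact Or.inr ⟨h.1, Or.inr h.2.1, h.2.2⟩
        · rintro (h | ⟨h1, h2 | h2, h3⟩)
          · exact Or.inl h
          · exact absurd h2 hv
          · exact Or.inr ⟨h1, h2, h3⟩
    · have hst : pvBSlot ie st x = st := by
        unfold pvBSlot
        rw [if_neg hc]
      rw [hst]
      simp only [List.mem_cons]
      constructor
      · rintro (h | h)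
        · exact Or.inl h
        · exact Or.inr ⟨h.1, Or.inr h.2.1, h.2.2⟩
      · rintro (h | ⟨h1, h2 | h2, h3⟩)
        · exact Or.inl h
        · subst h2; exact absurd h3 hc
        · exact Or.inr ⟨h1, h2, h3⟩

theorem pvBuildFold_contains (L : List (Int × List Int))
    (st : PySem.Dict Int Int × PySem.Dict Int (List (Int × List Int))) (k : Int) :
    ((L.foldl (fun st ie => ie.2.foldl (pvBSlot ie) st) st).1).contains k = st.1.contains k := by
  induction L generalizing st with
  | nil => rfl
  | cons ie L ih => simp only [List.foldl_cons]; rw [ih, pvBSlotFold_contains]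

theorem pvBuildFold_getD (L : List (Int × List Int))
    (st : PySem.Dict Int Int × PySem.Dict Int (List (Int × List Int))) (v : Int) :
    ((L.foldl (fun st ie => ie.2.foldl (pvBSlot ie) st) st).1).getD v 0 =
      st.1.getD v 0 + ((L.flatMap (fun ie => ie.2.filter (fun x => st.1.contains x))).count v : Int) := by
  induction L generalizing st with
  | nil => simp
  | cons ie L ih =>
    simp only [List.foldl_cons]
    rw [ih]
    have hflat : L.flatMap (fun ie' => ie'.2.filter (fun x => ((ie.2.foldl (pvBSlot ie) st).1).contains x)) =
        L.flatMap (fun ie' => ie'.2.filter (fun x => st.1.contains x)) := by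
      apply List.flatMap_congr
      intro ie' _
      exact List.filter_congr (fun y _ => pvBSlotFold_contains ie.2 ie st y)
    rw [hflat, pvBSlotFold_getD]
    simp [List.count_append]
    ring

theorem pvBuildFold_inc (L : List (Int × List Int)) :
    ∀ (st : PySem.Dict Int Int × PySem.Dict Int (List (Int × List Int))) (v : Int)
      (j : Int × List Int),
      j ∈ ((L.foldl (fun st ie => ie.2.foldl (pvBSlot ie) st) st).2).getD v [] ↔
        j ∈ st.2.getD v [] ∨ (j ∈ L ∧ v ∈ j.2 ∧ st.1.contains v = true) := by
  induction L with
  | nil => intro st v j; simp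
  | cons ie L ih =>
    intro st v j
    simp only [List.foldl_cons]
    rw [ih (ie.2.foldl (pvBSlot ie) st) v j, pvBSlotFold_inc, pvBSlotFold_contains]
    simp only [List.mem_cons]
    constructor
    · rintro ((h | ⟨h1, h2, h3⟩) | ⟨h1, h2, h3⟩)
      · exact Or.inl h
      · exact Or.inr ⟨Or.inl h1, h1 ▸ h2, h3⟩
      · exact Or.inr ⟨Or.inr h1, h2, h3⟩
    · rintro (h | ⟨h1 | h1, h2, h3⟩)
      · exact Or.inl (Or.inl h)
      · exact Or.inl (Or.inr ⟨h1, h1 ▸ h2, h3⟩)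
      · exact Or.inr ⟨h1, h2, h3⟩


-- ---- the main loop invariant ----

theorem pvMain : ∀ (N : Nat) (nodes : List Int) (edges0 : List (List Int)) (high : Bool)
    (deg mult : PySem.Dict Int Int) (dead : PySem.Set Int)
    (inc : PySem.Dict Int (List (Int × List Int))) (acc : List Int),
    nodes.length = N →
    (∀ v : Int, mult.getD v 0 = (nodes.count v : Int)) →
    (∀ v : Int, deg.contains v = decide (v ∈ nodes)) →
    (∀ v ∈ nodes, deg.getD v 0 = pvCntF (pvSurv edges0 dead) v) →
    (∀ (v : Int), ∀ ie ∈ inc.getD v [], ie ∈ PySem.List.enumerate edges0 0 ∧ v ∈ ie.2) →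
    (∀ v ∈ nodes, ∀ ie ∈ PySem.List.enumerate edges0 0, v ∈ ie.2 → ie ∈ inc.getD v []) →
    pvALoop nodes (pvSurv edges0 dead) (if high then 1 else -1) high acc
      = pvBLoop high inc N deg mult dead acc := by
  intro N
  induction N with
  | zero =>
    intro nodes edges0 high deg mult dead inc acc hN _ _ _ _ _
    have : nodes = [] := List.length_eq_zero_iff.mp hN
    subst this
    rw [pvALoop, pvBLoop]
  | succ N ih =>
    intro nodes edges0 high deg mult dead inc acc hN hmult hcont hval hIncS hIncC
    cases nodes with
    | nil => simp at hN
    | cons n0 rest =>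
    obtain ⟨hm_mem, hbest⟩ := pvSelB n0 rest (pvSurv edges0 dead) high deg hcont
      (fun v hv => (hval v hv).trans (pvCnt_mem hv (pvSurv edges0 dead)).symm)
    rw [pvALoop.eq_def, pvBLoop.eq_def]
    simp only [hbest]
    generalize hgen : ((PySem.List.sorted2 (pvACount (n0 :: rest) (pvSurv edges0 dead)).items
      (fun it => (if high then (1 : Int) else -1) * it.2) (fun it => it.1) high).headD (0, 0)).1 = m at hm_mem ⊢
    cases hrem : PySem.List.remove? (n0 :: rest) m with
    | none => exact absurd hm_mem ((PySem.List.remove?_eq_none_iff _ _).mp hrem)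
    | some nodes' =>
      rw [PySem.List.remove?_eq_some_erase _ _ hm_mem] at hrem
      injection hrem with hrem
      subst hrem
      obtain ⟨k1, k2, k3⟩ := pvKillFold edges0 (inc.getD m []) dead deg
        (fun ie h => (hIncS m ie h).1)
      have hJs : ∀ ie ∈ inc.getD m [], ie ∈ PySem.List.enumerate edges0 0 ∧ m ∈ ie.2 := hIncS m
      have hJc : ∀ ie ∈ PySem.List.enumerate edges0 0, m ∈ ie.2 → ie ∈ inc.getD m [] :=
        fun ie hie hm2 => hIncC m hm_mem ie hie hm2
      have hsurv := pvSurv_after edges0 dead _ (inc.getD m []) m hJs hJc k1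
      have hkill := pvKilled_eq_filter edges0 dead (inc.getD m []) m hJs hJc
      have hdeg1 : ∀ v ∈ (n0 :: rest).erase m,
          ((inc.getD m []).foldl pvBKill (dead, deg)).2.getD v 0
            = pvCntF (pvSurv edges0 ((inc.getD m []).foldl pvBKill (dead, deg)).1) v := by
        intro v hv
        have hvn : v ∈ n0 :: rest := List.mem_of_mem_erase hv
        rw [k3 v (by rw [hcont v]; simp [hvn])]
        rw [hval v hvn, hkill, hsurv]
        have := pvCntF_partition (pvSurv edges0 dead) (fun e => e.contains m) v
        omega
      have hcont1 : ∀ v : Int, ((inc.getD m []).foldl pvBKill (dead, deg)).2.contains v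
          = decide (v ∈ n0 :: rest) := fun v => (k2 v).trans (hcont v)
      have hcountpos : 0 < (n0 :: rest).count m := List.count_pos_iff.mpr hm_mem
      have hmult' : ∀ v : Int, (mult.insert m (mult.getD m 0 - 1)).getD v 0
          = (((n0 :: rest).erase m).count v : Int) := by
        intro v
        by_cases hvm : v = m
        · subst hvm
          rw [PySem.Dict.getD_insert_self, hmult v, List.count_erase_self]
          push_cast
          omega
        · rw [PySem.Dict.getD_insert_of_ne _ _ _ hvm, hmult v, List.count_erase_of_ne hvm]
      have hlen' : ((n0 :: rest).erase m).length = N := by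
        rw [List.length_erase_of_mem hm_mem]
        rw [hN]
        rfl
      by_cases hz : ((n0 :: rest).erase m).count m = 0
      · have hcondT : ((mult.insert m (mult.getD m 0 - 1)).getD m 0 == (0 : Int)) = true := by
          rw [hmult' m, hz]
          simp
        rw [if_pos hcondT]
        rw [← hsurv]
        have hnm : m ∉ (n0 :: rest).erase m := List.count_eq_zero.mp hz
        apply ih ((n0 :: rest).erase m) edges0 high _ _ _ inc _ hlen' hmult'
        · intro v
          by_cases hvm : v = m
          · subst hvm
            rw [pvErase_contains_self]
            simp [hnm]
          · rw [pvErase_contains_of_ne _ _ _ hvm, hcont1 v]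
            simp [List.mem_erase_of_ne hvm]
        · intro v hv
          have hvm : v ≠ m := fun h => hnm (h ▸ hv)
          rw [pvErase_getD _ _ _ _ hvm]
          exact hdeg1 v hv
        · exact hIncS
        · exact fun v hv => hIncC v (List.mem_of_mem_erase hv)
      · have hcondF : ¬ ((mult.insert m (mult.getD m 0 - 1)).getD m 0 == (0 : Int)) = true := by
          rw [hmult' m]
          simp only [beq_iff_eq, Int.natCast_eq_zero]
          exact hz
        rw [if_neg hcondF]
        rw [← hsurv]
        have hmm' : m ∈ (n0 :: rest).erase m := List.count_pos_iff.mp (Nat.pos_of_ne_zero hz)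
        apply ih ((n0 :: rest).erase m) edges0 high _ _ _ inc _ hlen' hmult'
        · intro v
          rw [hcont1 v]
          by_cases hvm : v = m
          · subst hvm
            simp [hm_mem, hmm']
          · simp [List.mem_erase_of_ne hvm]
        · exact hdeg1
        · exact hIncS
        · exact fun v hv => hIncC v (List.mem_of_mem_erase hv)

theorem pvSurv_empty (edges0 : List (List Int)) : pvSurv edges0 PySem.Set.empty = edges0 := by
  unfold pvSurv
  have h1 : (PySem.List.enumerate edges0 0).filterMap
        (fun ie => if PySem.Set.contains PySem.Set.empty ie.1 then none else some ie.2)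
      = (PySem.List.enumerate edges0 0).filterMap (fun ie => some ie.2) :=
    List.filterMap_congr (fun ie _ => by simp [PySem.Set.empty, PySem.Set.contains])
  rw [h1]
  rw [show (fun ie : Int × List Int => some ie.2)
      = some ∘ (fun ie : Int × List Int => ie.2) from rfl, List.filterMap_eq_map]
  exact PySem.List.map_snd_enumerate edges0 0

-- ===== VERDICT (by name: the statement is the Claim_ definition above) =====
theorem nodePriority_spec : Claim_equal_nodePriority := by
  intro nodesEdges high _
  unfold Spec_nodePriority nodePriority nodePriority_alt
  obtain ⟨nodes0, edges0⟩ := nodesEdges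
  simp only []
  have hm : ∀ v : Int, (nodes0.foldl (fun d n => d.insert n (d.getD n 0 + 1))
      PySem.Dict.empty).getD v 0 = (nodes0.count v : Int) := by
    intro v
    rw [PySem.Dict.getD_foldl_insert_add_one]
    simp
  have hc : ∀ v : Int, (pvBBuild edges0 (nodes0.foldl (fun d n => d.insert n 0)
      PySem.Dict.empty)).1.contains v = decide (v ∈ nodes0) := by
    intro v
    unfold pvBBuild
    rw [pvBuildFold_contains]
    exact pvInit_contains nodes0 v
  have hfm : (PySem.List.enumerate edges0 0).flatMap (fun ie => ie.2.filter
        (fun x => (nodes0.foldl (fun d n => d.insert n 0)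
          (PySem.Dict.empty : PySem.Dict Int Int)).contains x))
      = edges0.flatMap (fun e => e.filter (fun x => decide (x ∈ nodes0))) := by
    have step1 : (PySem.List.enumerate edges0 0).flatMap (fun ie => ie.2.filter
          (fun x => (nodes0.foldl (fun d n => d.insert n 0)
            (PySem.Dict.empty : PySem.Dict Int Int)).contains x))
        = (PySem.List.enumerate edges0 0).flatMap
          (fun ie => ie.2.filter (fun x => decide (x ∈ nodes0))) := by
      apply List.flatMap_congr
      intro ie _
      apply List.filter_congr
      intro y _
      exact pvInit_contains nodes0 y
    rw [step1]
    conv_rhs => rw [← PySem.List.map_snd_enumerate edges0 0]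
    rw [List.flatMap_map]
  have hval : ∀ v ∈ nodes0, (pvBBuild edges0 (nodes0.foldl (fun d n => d.insert n 0)
      PySem.Dict.empty)).1.getD v 0 = pvCntF (pvSurv edges0 PySem.Set.empty) v := by
    intro v hvm
    rw [pvSurv_empty]
    unfold pvBBuild
    rw [pvBuildFold_getD]
    rw [pvInit_getD nodes0 PySem.Dict.empty (fun k => PySem.Dict.getD_empty k 0) v]
    dsimp only
    rw [hfm]
    have := pvCnt_mem hvm edges0
    unfold pvCnt at this
    omega
  have hs : ∀ (v : Int), ∀ ie ∈ (pvBBuild edges0 (nodes0.foldl (fun d n => d.insert n 0)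
      PySem.Dict.empty)).2.getD v [], ie ∈ PySem.List.enumerate edges0 0 ∧ v ∈ ie.2 := by
    intro v ie hie
    unfold pvBBuild at hie
    have := (pvBuildFold_inc _ _ v ie).mp hie
    rcases this with h | h
    · rw [show (PySem.Dict.empty : PySem.Dict Int (List (Int × List Int))).getD v [] = []
        from PySem.Dict.getD_empty v []] at h
      simp at h
    · exact ⟨h.1, h.2.1⟩
  have hcc : ∀ v ∈ nodes0, ∀ ie ∈ PySem.List.enumerate edges0 0, v ∈ ie.2 →
      ie ∈ (pvBBuild edges0 (nodes0.foldl (fun d n => d.insert n 0)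
        PySem.Dict.empty)).2.getD v [] := by
    intro v hvm ie hie hv2
    unfold pvBBuild
    refine (pvBuildFold_inc _ _ v ie).mpr (Or.inr ⟨hie, hv2, ?_⟩)
    dsimp only
    rw [pvInit_contains]
    simp [hvm]
  have := pvMain nodes0.length nodes0 edges0 high _ _ PySem.Set.empty _ [] rfl hm hc hval hs hcc
  rw [pvSurv_empty] at this
  exact this
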